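-- pv_equiv track=rewrite | github.com/Dharmmey-1/4B3b-Assignments-Project | kaybes/classwork.py | nkechi
-- ===== SOURCE A (Python) =====
-- def nkechi(start_at=1, stop_at=9):
--     result = []
--     for x in range(start_at, stop_at):
--         for y in range(start_at, stop_at):
--             for z in range(start_at, stop_at):
--                 sum = x * 100 + y * 10 + z
--                 target = z * 100 + z * 10 + z
--                 if sum * 3 == target:
--                     result.append(sum)
--     return result
-- ===== SOURCE B (Python) =====
-- def nkechi(start_at=1, stop_at=9):
--     # 3*(100x+10y+z) == 111z  <=>  50x+5y == 18z, so z is determined by (x, y).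
--     result = []
--     for x in range(start_at, stop_at):
--         for y in range(start_at, stop_at):
--             num = 50 * x + 5 * y
--             if num % 18 == 0:
--                 z = num // 18
--                 if start_at <= z < stop_at:
--                     result.append(x * 100 + y * 10 + z)
--     return result
-- ===== Notes on version B (the rewrite author's own statement) =====
-- stated objective: alternative
-- what changed: B drops A's innermost z-scan by solving the linear condition 3*(100x+10y+z)=111z for z directly (z=(50x+5y)//18 when divisible and in range), turning the triple loop into a double loop; on wide ranges the output list itself is quadratic, so B is not measurably faster end to end.
import Mathlib
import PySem

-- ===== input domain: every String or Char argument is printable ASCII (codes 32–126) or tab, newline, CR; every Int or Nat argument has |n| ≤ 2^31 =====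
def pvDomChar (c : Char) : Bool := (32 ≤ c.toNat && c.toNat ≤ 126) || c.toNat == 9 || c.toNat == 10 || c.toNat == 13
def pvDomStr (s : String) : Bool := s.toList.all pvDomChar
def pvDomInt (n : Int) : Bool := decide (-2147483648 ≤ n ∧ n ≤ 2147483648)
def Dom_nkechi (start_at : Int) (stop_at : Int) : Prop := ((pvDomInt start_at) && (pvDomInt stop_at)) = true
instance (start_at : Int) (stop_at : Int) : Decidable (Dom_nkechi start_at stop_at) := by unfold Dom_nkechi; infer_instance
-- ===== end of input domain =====

-- B replaces A's innermost z-scan by solving the condition 50x+5y = 18z for z directly (alternative algorithm, two loops instead of three).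

-- ===== PORT A =====
def nkechi (start_at : Int) (stop_at : Int) : List Int :=
  (PySem.List.pyRange start_at stop_at 1).foldl (fun result x =>
    (PySem.List.pyRange start_at stop_at 1).foldl (fun result y =>
      (PySem.List.pyRange start_at stop_at 1).foldl (fun result z =>
        let sum := x * 100 + y * 10 + z
        let target := z * 100 + z * 10 + z
        if sum * 3 = target then result ++ [sum] else result) result) result) []

-- ===== PORT B =====
def nkechi_alt (start_at : Int) (stop_at : Int) : List Int :=
  (PySem.List.pyRange start_at stop_at 1).foldl (fun result x =>
    (PySem.List.pyRange start_at stop_at 1).foldl (fun result y =>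
      let num := 50 * x + 5 * y
      if PySem.Int.mod num 18 = 0 then
        let z := PySem.Int.floordiv num 18
        if start_at ≤ z ∧ z < stop_at then result ++ [x * 100 + y * 10 + z] else result
      else result) result) []

-- ===== PRECONDITION & SPEC =====
def Spec_nkechi (start_at : Int) (stop_at : Int) (out : List Int) : Prop := out = nkechi_alt start_at stop_at
instance (start_at : Int) (stop_at : Int) (out : List Int) : Decidable (Spec_nkechi start_at stop_at out) := by unfold Spec_nkechi; infer_instance

-- ===== CLAIM (what is proved, stated in full; the proofs are below) =====
def Claim_equal_nkechi : Prop := ∀ (start_at : Int) (stop_at : Int), Dom_nkechi start_at stop_at → Spec_nkechi start_at stop_at (nkechi start_at stop_at)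

-- ===== LEMMAS AND PROOFS =====

-- the filter of the z-range by '18*z = num' is the singleton [num/18] when 18 ∣ num and num/18 is in range, else []
lemma filter_solve (s t num : Int) :
    (PySem.List.pyRange s t 1).filter (fun z => decide (18 * z = num)) =
      (if PySem.Int.mod num 18 = 0 then
        if s ≤ PySem.Int.floordiv num 18 ∧ PySem.Int.floordiv num 18 < t then
          [PySem.Int.floordiv num 18] else []
      else []) := by
  rw [PySem.Int.floordiv_eq_ediv_of_pos (by norm_num : (0:Int) < 18)]
  by_cases hd : PySem.Int.mod num 18 = 0
  · have hdvd : (18 : Int) ∣ num := (PySem.Int.mod_eq_zero_iff_dvd num 18).mp hd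
    obtain ⟨z0, hz0⟩ := hdvd
    have hq : num / 18 = z0 := by rw [hz0]; exact Int.mul_ediv_cancel_left z0 (by norm_num)
    rw [if_pos hd, hq]
    have hpred : ∀ z : Int, (decide (18 * z = num)) = (decide (z = z0)) := by
      intro z; rcases Decidable.em (z = z0) with h | h
      · subst h; simp [hz0]
      · simp only [decide_eq_decide]
        constructor <;> intro h' <;> omega
    rw [List.filter_congr (fun z _ => hpred z)]
    by_cases hm : s ≤ z0 ∧ z0 < t
    · have hmem : z0 ∈ PySem.List.pyRange s t 1 :=
        (PySem.List.mem_pyRange_one).mpr hm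
      rw [if_pos hm]
      have hnd := PySem.List.nodup_pyRange_one (a := s) (b := t)
      have hcount : (PySem.List.pyRange s t 1).count z0 = 1 :=
        List.count_eq_one_of_mem hnd hmem
      calc (PySem.List.pyRange s t 1).filter (fun z => decide (z = z0))
          = List.replicate ((PySem.List.pyRange s t 1).count z0) z0 := by
            rw [← List.filter_eq]
        _ = [z0] := by rw [hcount]; rfl
    · rw [if_neg hm]
      rw [List.filter_eq_nil_iff]
      intro z hz hdz
      have := (PySem.List.mem_pyRange_one).mp hz
      have : z = z0 := by simpa using hdz
      omega
  · rw [if_neg hd]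
    rw [List.filter_eq_nil_iff]
    intro z hz hdz
    have h18 : 18 * z = num := by simpa using hdz
    exact hd ((PySem.Int.mod_eq_zero_iff_dvd num 18).mpr ⟨z, h18.symm⟩)

-- A's innermost loop over z equals B's direct solution for z
lemma inner_loop (s t x y : Int) (acc : List Int) :
    (PySem.List.pyRange s t 1).foldl (fun result z =>
        let sum := x * 100 + y * 10 + z
        let target := z * 100 + z * 10 + z
        if sum * 3 = target then result ++ [sum] else result) acc =
    (let num := 50 * x + 5 * y
     if PySem.Int.mod num 18 = 0 then
       let z := PySem.Int.floordiv num 18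
       if s ≤ z ∧ z < t then acc ++ [x * 100 + y * 10 + z] else acc
     else acc) := by
  have h1 : (PySem.List.pyRange s t 1).foldl (fun result z =>
        let sum := x * 100 + y * 10 + z
        let target := z * 100 + z * 10 + z
        if sum * 3 = target then result ++ [sum] else result) acc =
      acc ++ ((PySem.List.pyRange s t 1).filter
          (fun z => decide ((x * 100 + y * 10 + z) * 3 = z * 100 + z * 10 + z))).map
        (fun z => x * 100 + y * 10 + z) :=
    PySem.List.foldl_append_ite (l := PySem.List.pyRange s t 1)
      (p := fun z => (x * 100 + y * 10 + z) * 3 = z * 100 + z * 10 + z)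
      (f := fun z => x * 100 + y * 10 + z) (acc := acc)
  rw [h1]
  have h2 : ∀ z : Int, z ∈ PySem.List.pyRange s t 1 →
      (decide ((x * 100 + y * 10 + z) * 3 = z * 100 + z * 10 + z)) =
      (decide (18 * z = 50 * x + 5 * y)) := by
    intro z _
    exact decide_eq_decide.mpr (by constructor <;> intro h <;> omega)
  rw [List.filter_congr h2, filter_solve s t (50 * x + 5 * y)]
  have hfd : PySem.Int.floordiv (50 * x + 5 * y) 18 = (50 * x + 5 * y) / 18 :=
    PySem.Int.floordiv_eq_ediv_of_pos (by norm_num)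
  split_ifs with hd hm
  · have hdvd : (18:Int) ∣ 50 * x + 5 * y := (PySem.Int.mod_eq_zero_iff_dvd _ _).mp hd
    rw [hfd] at hm
    simp [hdvd, hm]
  · have hdvd : (18:Int) ∣ 50 * x + 5 * y := (PySem.Int.mod_eq_zero_iff_dvd _ _).mp hd
    rw [hfd] at hm
    simp [hdvd, hm]
  · have hnd : ¬ (18:Int) ∣ 50 * x + 5 * y :=
      fun h => hd ((PySem.Int.mod_eq_zero_iff_dvd _ _).mpr h)
    simp [hnd]

-- ===== VERDICT (by name: the statement is the Claim_ definition above) =====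
theorem nkechi_spec : Claim_equal_nkechi := by
  intro s t _
  unfold Spec_nkechi nkechi nkechi_alt
  congr 1
  funext result x
  congr 1
  funext result y
  exact inner_loop s t x y result
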